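-- pv_equiv track=rewrite | github.com/mmc00/equilibria | src/equilibria/sam_tools/ieem_raw_excel.py | _build_pep_key_order
-- ===== SOURCE A (Python) =====
-- from typing import Any
--
-- SPECIAL_LABELS = {"S-HH", "S-FIRM", "S-GVT", "S-ROW", "INV", "VSTK"}
--
-- def _norm_text(value: Any) -> str:
--     return " ".join(str(value).strip().split())
--
-- def _label_to_key(label: str) -> tuple[str, str] | None:
--     label_up = _norm_text(label).upper()
--     if label_up in SPECIAL_LABELS:
--         return None
--     if label_up.startswith("A-"):
--         return ("J", label_up[2:].lower())
--     if label_up.startswith("C-"):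
--         return ("I", label_up[2:].lower())
--     if label_up in {"USK", "SK"}:
--         return ("L", label_up.lower())
--     if label_up in {"CAP", "LAND"}:
--         return ("K", label_up.lower())
--     if label_up in {"HRP", "HRR", "HUP", "HUR", "FIRM", "GVT", "ROW", "TD", "TI", "TM", "TX"}:
--         return ("AG", label_up.lower())
--     if label_up == "MARG":
--         return ("MARG", "MARG")
--     return None
--
-- def _build_pep_key_order(labels: list[str]) -> list[tuple[str, str]]:
--     j_keys: list[tuple[str, str]] = []
--     i_keys: list[tuple[str, str]] = []
--     l_keys: list[tuple[str, str]] = []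
--     k_keys: list[tuple[str, str]] = []
--     ag_keys: list[tuple[str, str]] = []
--     has_marg = False
--
--     for label in labels:
--         key = _label_to_key(label)
--         if key is None:
--             continue
--         cat, _ = key
--         if cat == "J" and key not in j_keys:
--             j_keys.append(key)
--         elif cat == "I" and key not in i_keys:
--             i_keys.append(key)
--         elif cat == "L" and key not in l_keys:
--             l_keys.append(key)
--         elif cat == "K" and key not in k_keys:
--             k_keys.append(key)
--         elif cat == "AG" and key not in ag_keys:
--             ag_keys.append(key)
--         elif cat == "MARG":
--             has_marg = True
--
--     ag_order = ["ti", "tm", "tx", "td", "hrp", "hrr", "hup", "hur", "firm", "gvt", "row"]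
--     ag_sorted = [("AG", elem) for elem in ag_order if ("AG", elem) in ag_keys]
--
--     keys: list[tuple[str, str]] = []
--     keys.extend(j_keys)
--     keys.extend(i_keys)
--     keys.extend(l_keys)
--     keys.extend(k_keys)
--     keys.extend(ag_sorted)
--     if has_marg:
--         keys.append(("MARG", "MARG"))
--     keys.extend([("OTH", "INV"), ("OTH", "VSTK")])
--     return keys
-- ===== SOURCE B (Python) =====
-- # B: map labels to keys once, then assemble per-category via filtered ordered dedup
-- # (dict.fromkeys) instead of a single dispatch loop with five accumulators.
-- SPECIAL_LABELS = {"S-HH", "S-FIRM", "S-GVT", "S-ROW", "INV", "VSTK"}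
--
-- def _norm_text(value) -> str:
--     return " ".join(str(value).strip().split())
--
-- def _label_to_key(label):
--     label_up = _norm_text(label).upper()
--     if label_up in SPECIAL_LABELS:
--         return None
--     if label_up.startswith("A-"):
--         return ("J", label_up[2:].lower())
--     if label_up.startswith("C-"):
--         return ("I", label_up[2:].lower())
--     if label_up in {"USK", "SK"}:
--         return ("L", label_up.lower())
--     if label_up in {"CAP", "LAND"}:
--         return ("K", label_up.lower())
--     if label_up in {"HRP", "HRR", "HUP", "HUR", "FIRM", "GVT", "ROW", "TD", "TI", "TM", "TX"}:
--         return ("AG", label_up.lower())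
--     if label_up == "MARG":
--         return ("MARG", "MARG")
--     return None
--
-- def _build_pep_key_order(labels):
--     ks = [k for k in map(_label_to_key, labels) if k is not None]
--
--     def cat(c):
--         return list(dict.fromkeys(k for k in ks if k[0] == c))
--
--     ag = cat("AG")
--     ag_order = ["ti", "tm", "tx", "td", "hrp", "hrr", "hup", "hur", "firm", "gvt", "row"]
--     keys = cat("J") + cat("I") + cat("L") + cat("K") \
--         + [("AG", e) for e in ag_order if ("AG", e) in ag]
--     if any(k[0] == "MARG" for k in ks):
--         keys.append(("MARG", "MARG"))
--     return keys + [("OTH", "INV"), ("OTH", "VSTK")]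
-- ===== Notes on version B (the rewrite author's own statement) =====
-- stated objective: alternative
-- what changed: A's single loop that dispatches each label's key into five category accumulators (deduplicating by membership as it goes) is replaced by one map-to-keys pass followed by per-category filtered ordered dedups (dict.fromkeys) and an any() test for MARG, assembled in the same fixed order.
import Mathlib
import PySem

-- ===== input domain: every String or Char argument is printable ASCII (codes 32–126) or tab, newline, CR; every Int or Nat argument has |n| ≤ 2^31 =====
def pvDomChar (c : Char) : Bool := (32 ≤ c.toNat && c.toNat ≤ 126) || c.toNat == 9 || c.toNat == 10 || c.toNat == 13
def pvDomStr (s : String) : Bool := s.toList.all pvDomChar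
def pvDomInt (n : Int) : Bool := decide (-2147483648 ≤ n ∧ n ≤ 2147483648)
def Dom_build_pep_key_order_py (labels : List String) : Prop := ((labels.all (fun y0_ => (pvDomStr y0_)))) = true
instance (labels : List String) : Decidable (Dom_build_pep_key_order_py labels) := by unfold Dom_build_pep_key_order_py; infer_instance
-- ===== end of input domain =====

-- B replaces A's single dispatch loop with five accumulators by a map-to-keys pass followed by
-- per-category filtered ordered dedups (dict.fromkeys); objective: alternative decomposition, same cost.

-- ===== PORT A =====
-- shared module helpers (identical source lines in Source A and Source B)
def normText (value : String) : String :=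
  PySem.Str.join " " (PySem.Str.split₀ (PySem.Str.strip value))

def labelToKey (label : String) : Option (String × String) :=
  let label_up := PySem.Str.upper (normText label)
  if ["S-HH", "S-FIRM", "S-GVT", "S-ROW", "INV", "VSTK"].contains label_up then none
  else if PySem.Str.startswith label_up "A-" then
    some ("J", PySem.Str.lower (PySem.Str.slice label_up (some 2) none))
  else if PySem.Str.startswith label_up "C-" then
    some ("I", PySem.Str.lower (PySem.Str.slice label_up (some 2) none))
  else if ["USK", "SK"].contains label_up then some ("L", PySem.Str.lower label_up)
  else if ["CAP", "LAND"].contains label_up then some ("K", PySem.Str.lower label_up)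
  else if ["HRP", "HRR", "HUP", "HUR", "FIRM", "GVT", "ROW", "TD", "TI", "TM", "TX"].contains label_up then
    some ("AG", PySem.Str.lower label_up)
  else if label_up == "MARG" then some ("MARG", "MARG")
  else none

-- one step of A's dispatch loop (state: j, i, l, k, ag key lists and the has_marg flag)
def pvStateA := List (String × String) × List (String × String) × List (String × String) ×
    List (String × String) × List (String × String) × Bool

def pvStepA (st : pvStateA) (label : String) : pvStateA :=
  match labelToKey label with
  | none => st
  | some key =>
    let (j, i, l, k, ag, m) := st
    let cat := key.1
    if cat == "J" && !(j.contains key) then (j ++ [key], i, l, k, ag, m)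
    else if cat == "I" && !(i.contains key) then (j, i ++ [key], l, k, ag, m)
    else if cat == "L" && !(l.contains key) then (j, i, l ++ [key], k, ag, m)
    else if cat == "K" && !(k.contains key) then (j, i, l, k ++ [key], ag, m)
    else if cat == "AG" && !(ag.contains key) then (j, i, l, k, ag ++ [key], m)
    else if cat == "MARG" then (j, i, l, k, ag, true)
    else st

def pvAgOrder : List String :=
  ["ti", "tm", "tx", "td", "hrp", "hrr", "hup", "hur", "firm", "gvt", "row"]

def build_pep_key_order_py (labels : List String) : List (String × String) :=
  let st := labels.foldl pvStepA ([], [], [], [], [], false)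
  let (j_keys, i_keys, l_keys, k_keys, ag_keys, has_marg) := st
  let ag_sorted := (pvAgOrder.filter (fun e => ag_keys.contains ("AG", e))).map (fun e => ("AG", e))
  j_keys ++ i_keys ++ l_keys ++ k_keys ++ ag_sorted ++
    (if has_marg then [("MARG", "MARG")] else []) ++ [("OTH", "INV"), ("OTH", "VSTK")]

-- ===== PORT B =====
def build_pep_key_order_py_alt (labels : List String) : List (String × String) :=
  let ks := (labels.map labelToKey).filterMap id
  let cat := fun (c : String) => PySem.List.dedup (ks.filter (fun k => k.1 == c))
  let ag := cat "AG"
  let keys := cat "J" ++ cat "I" ++ cat "L" ++ cat "K" ++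
    (pvAgOrder.filter (fun e => ag.contains ("AG", e))).map (fun e => ("AG", e))
  let keys := if ks.any (fun k => k.1 == "MARG") then keys ++ [("MARG", "MARG")] else keys
  keys ++ [("OTH", "INV"), ("OTH", "VSTK")]

-- ===== PRECONDITION & SPEC =====
def Spec_build_pep_key_order_py (labels : List String) (out : List (String × String)) : Prop := out = build_pep_key_order_py_alt labels
instance (labels : List String) (out : List (String × String)) : Decidable (Spec_build_pep_key_order_py labels out) := by unfold Spec_build_pep_key_order_py; infer_instance

-- ===== CLAIM (what is proved, stated in full; the proofs are below) =====
def Claim_equal_build_pep_key_order_py : Prop := ∀ (labels : List String), Dom_build_pep_key_order_py labels → Spec_build_pep_key_order_py labels (build_pep_key_order_py labels)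

-- ===== LEMMAS AND PROOFS =====

-- the non-None keys of a label list, and its slice of one category
def pvKeys (ls : List String) : List (String × String) := (ls.map labelToKey).filterMap id

def pvCat (ls : List String) (c : String) : List (String × String) :=
  (pvKeys ls).filter (fun k => k.1 == c)

theorem pvKeys_cons (a : String) (ls : List String) :
    pvKeys (a :: ls) = (labelToKey a).toList ++ pvKeys ls := by
  unfold pvKeys
  rw [List.map_cons, List.filterMap_cons]
  cases labelToKey a <;> rfl

-- invariant of A's loop: it computes, per category, the accumulator-seeded ordered dedup
-- of that category's key stream, and OR-accumulates the MARG flag.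
theorem foldA_eq (ls : List String) (j i l k ag : List (String × String)) (m : Bool) :
    ls.foldl pvStepA (j, i, l, k, ag, m) =
      ((pvCat ls "J").foldl PySem.Set.add j,
       (pvCat ls "I").foldl PySem.Set.add i,
       (pvCat ls "L").foldl PySem.Set.add l,
       (pvCat ls "K").foldl PySem.Set.add k,
       (pvCat ls "AG").foldl PySem.Set.add ag,
       m || (pvKeys ls).any (fun x => x.1 == "MARG")) := by
  induction ls generalizing j i l k ag m with
  | nil =>
    simp only [pvCat, pvKeys, List.map_nil, List.filterMap_nil, List.filter_nil,
      List.foldl_nil, List.any_nil, Bool.or_false]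
  | cons a ls ih =>
    have hcat : ∀ c, pvCat (a :: ls) c =
        ((labelToKey a).toList.filter (fun k => k.1 == c)) ++ pvCat ls c := by
      intro c; unfold pvCat; rw [pvKeys_cons, List.filter_append]
    have hany : (pvKeys (a :: ls)).any (fun x => x.1 == "MARG") =
        (((labelToKey a).toList.any (fun x => x.1 == "MARG")) || (pvKeys ls).any (fun x => x.1 == "MARG")) := by
      simp [pvKeys_cons]
    simp only [List.foldl_cons]
    cases hk : labelToKey a with
    | none =>
      have hstep : pvStepA (j, i, l, k, ag, m) a = (j, i, l, k, ag, m) := by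
        simp [pvStepA, hk]
      rw [hstep, ih]
      simp only [hcat, hk, hany, Option.toList_none, List.filter_nil, List.nil_append,
        List.any_nil, Bool.false_or]
    | some key =>
      obtain ⟨c, v⟩ := key
      simp only [hcat, hk, hany, Option.toList_some]
      by_cases hJ : c = "J"
      · subst hJ
        have hstep : pvStepA (j, i, l, k, ag, m) a = (PySem.Set.add j (("J", v)), i, l, k, ag, m) := by
          simp [pvStepA, hk, PySem.Set.add, PySem.Set.contains]
          split_ifs with h <;> simp_all
        rw [hstep, ih]
        simp [List.filter]
      · by_cases hI : c = "I"
        · subst hI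
          have hstep : pvStepA (j, i, l, k, ag, m) a = (j, PySem.Set.add i (("I", v)), l, k, ag, m) := by
            simp [pvStepA, hk, PySem.Set.add, PySem.Set.contains]
            split_ifs with h <;> simp_all
          rw [hstep, ih]
          simp [List.filter]
        · by_cases hL : c = "L"
          · subst hL
            have hstep : pvStepA (j, i, l, k, ag, m) a = (j, i, PySem.Set.add l (("L", v)), k, ag, m) := by
              simp [pvStepA, hk, PySem.Set.add, PySem.Set.contains]
              split_ifs with h <;> simp_all
            rw [hstep, ih]
            simp [List.filter]
          · by_cases hK : c = "K"
            · subst hK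
              have hstep : pvStepA (j, i, l, k, ag, m) a = (j, i, l, PySem.Set.add k (("K", v)), ag, m) := by
                simp [pvStepA, hk, PySem.Set.add, PySem.Set.contains]
                split_ifs with h <;> simp_all
              rw [hstep, ih]
              simp [List.filter]
            · by_cases hAG : c = "AG"
              · subst hAG
                have hstep : pvStepA (j, i, l, k, ag, m) a = (j, i, l, k, PySem.Set.add ag (("AG", v)), m) := by
                  simp [pvStepA, hk, PySem.Set.add, PySem.Set.contains]
                  split_ifs with h <;> simp_all
                rw [hstep, ih]
                simp [List.filter]
              · by_cases hM : c = "MARG"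
                · subst hM
                  have hstep : pvStepA (j, i, l, k, ag, m) a = (j, i, l, k, ag, true) := by
                    simp [pvStepA, hk]
                  rw [hstep, ih]
                  simp [List.filter]
                · have hstep : pvStepA (j, i, l, k, ag, m) a = (j, i, l, k, ag, m) := by
                    simp [pvStepA, hk, hJ, hI, hL, hK, hAG, hM]
                  rw [hstep, ih]
                  have eJ : (c == "J") = false := by simp [hJ]
                  have eI : (c == "I") = false := by simp [hI]
                  have eL : (c == "L") = false := by simp [hL]
                  have eK : (c == "K") = false := by simp [hK]
                  have eAG : (c == "AG") = false := by simp [hAG]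
                  have eM : (c == "MARG") = false := by simp [hM]
                  simp [List.filter, eJ, eI, eL, eK, eAG, eM]

theorem dedup_eq_foldl_add {α : Type} [BEq α] (xs : List α) :
    xs.foldl PySem.Set.add [] = PySem.List.dedup xs := by
  rw [PySem.List.dedup_eq_ofList, PySem.Set.ofList_eq_foldl]

-- ===== VERDICT (by name: the statement is the Claim_ definition above) =====
theorem build_pep_key_order_py_spec : Claim_equal_build_pep_key_order_py := by
  intro labels _
  show build_pep_key_order_py labels = build_pep_key_order_py_alt labels
  unfold build_pep_key_order_py build_pep_key_order_py_alt
  rw [foldA_eq]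
  simp only [dedup_eq_foldl_add, Bool.false_or]
  simp only [pvCat, pvKeys, pvAgOrder]
  split_ifs <;> simp only [List.append_assoc, List.append_nil]
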